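-- pv_equiv track=rewrite | github.com/iwodder/sudoku | tests/test_board_factory.py | __contains_invalid_row
-- ===== SOURCE A (Python) =====
-- def __contains_invalid_row(board):
--     for row in board:
--         numbers = set([])
--         for val in row:
--             if val in numbers:
--                 return True
--             else:
--                 if val != 0:
--                     numbers.add(val)
-- ===== SOURCE B (Python) =====
-- def __contains_invalid_row(board):
--     for row in board:
--         nonzero = [val for val in row if val != 0]
--         if len(nonzero) != len(set(nonzero)):
--             return True
-- ===== Notes on version B (the rewrite author's own statement) =====
-- stated objective: simpler
-- what changed: Replaced the incremental seen-set with per-element membership checks and early exit by a whole-row cardinality test: filter out zeros and compare len(nonzero) with len(set(nonzero)).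
import Mathlib
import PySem

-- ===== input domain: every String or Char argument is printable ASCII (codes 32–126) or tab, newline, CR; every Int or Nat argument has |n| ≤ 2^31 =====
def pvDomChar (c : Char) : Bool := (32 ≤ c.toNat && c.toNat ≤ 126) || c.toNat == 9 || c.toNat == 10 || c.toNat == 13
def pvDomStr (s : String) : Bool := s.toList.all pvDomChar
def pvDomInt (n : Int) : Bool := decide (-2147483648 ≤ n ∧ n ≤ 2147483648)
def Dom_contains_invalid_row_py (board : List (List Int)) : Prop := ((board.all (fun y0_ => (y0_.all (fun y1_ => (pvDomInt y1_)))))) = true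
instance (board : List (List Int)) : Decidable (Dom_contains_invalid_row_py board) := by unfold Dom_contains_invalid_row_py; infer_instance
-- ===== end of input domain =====

-- B replaces A's incremental seen-set with early exit inside the row by a whole-row
-- cardinality test (zeros filtered out, then len(nonzero) vs len(set(nonzero))); objective: simpler.

-- ===== PORT A =====
-- inner 'for val in row' loop of A: returns true when the function would 'return True'
def pvARow : List Int → PySem.Set Int → Bool
  | [], _ => false
  | v :: vs, numbers =>
    if PySem.Set.contains numbers v then true
    else if v ≠ 0 then pvARow vs (PySem.Set.add numbers v)
    else pvARow vs numbers

def contains_invalid_row_py (board : List (List Int)) : Option Bool :=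
  match board with
  | [] => none
  | row :: rest =>
    if pvARow row PySem.Set.empty then some true
    else contains_invalid_row_py rest

-- ===== PORT B =====
-- one row of B: nonzero = [v for v in row if v != 0]; len(nonzero) != len(set(nonzero))
def pvBRow (row : List Int) : Bool :=
  let nonzero := row.filter (fun v => decide (v ≠ 0))
  decide (nonzero.length ≠ (PySem.Set.ofList nonzero).length)

def contains_invalid_row_py_alt (board : List (List Int)) : Option Bool :=
  match board with
  | [] => none
  | row :: rest =>
    if pvBRow row then some true
    else contains_invalid_row_py_alt rest

-- ===== PRECONDITION & SPEC =====
def Spec_contains_invalid_row_py (board : List (List Int)) (out : Option Bool) : Prop := out = contains_invalid_row_py_alt board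
instance (board : List (List Int)) (out : Option Bool) : Decidable (Spec_contains_invalid_row_py board out) := by unfold Spec_contains_invalid_row_py; infer_instance

-- ===== CLAIM (what is proved, stated in full; the proofs are below) =====
def Claim_equal_contains_invalid_row_py : Prop := ∀ (board : List (List Int)), Dom_contains_invalid_row_py board → Spec_contains_invalid_row_py board (contains_invalid_row_py board)

-- ===== LEMMAS AND PROOFS =====

-- A's inner loop detects exactly a duplicate among s ++ (nonzero values of the row),
-- provided s is a set of nonzero values.
lemma pvARow_eq (row : List Int) :
    ∀ s : PySem.Set Int, s.Nodup → (0 : Int) ∉ s →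
      pvARow row s = !decide ((s ++ row.filter (fun v => decide (v ≠ 0))).Nodup) := by
  induction row with
  | nil =>
    intro s hs _
    simp [pvARow, hs]
  | cons v vs ih =>
    intro s hs h0
    by_cases hv : v ∈ s
    · have hvne : v ≠ 0 := fun h => h0 (h ▸ hv)
      have hmem : v ∈ (v :: vs).filter (fun v => decide (v ≠ 0)) := by simp [hvne]
      have hdup : ¬ (s ++ (v :: vs).filter (fun v => decide (v ≠ 0))).Nodup :=
        fun h => (List.nodup_append.1 h).2.2 v hv v hmem rfl
      simp [pvARow, hv]
      simpa using hdup
    · by_cases hvz : v = 0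
      · subst hvz
        have hrec := ih s hs h0
        simp [pvARow, hv, hrec]
      · have hadd : PySem.Set.add s v = s ++ [v] := by
          simp [PySem.Set.add, hv]
        have hnodup : (s ++ [v]).Nodup := by
          simp [List.nodup_append, hs]
          exact fun a ha he => hv (he ▸ ha)
        have h0' : (0 : Int) ∉ s ++ [v] := by
          simp [h0, Ne.symm hvz]
        have hrec := ih (s ++ [v]) hnodup h0'
        simp [pvARow, hv, hvz, hrec, List.append_assoc]

-- the cardinality test of B detects exactly a duplicate in the filtered row
lemma pvBRow_eq (row : List Int) :
    pvBRow row = !decide ((row.filter (fun v => decide (v ≠ 0))).Nodup) := by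
  unfold pvBRow
  set xs := row.filter (fun v => decide (v ≠ 0)) with hxs
  by_cases h : xs.Nodup
  · simp [PySem.Set.ofList_eq_self_of_nodup xs h, h]
  · have hlen : (PySem.Set.ofList xs).length < xs.length := by
      have hsub : xs.dedup.Sublist xs := List.dedup_sublist xs
      have hne : xs.dedup ≠ xs := fun he => h ((List.dedup_eq_self).1 he)
      have hlt : xs.dedup.length < xs.length :=
        lt_of_le_of_ne (hsub.length_le) (fun he => hne (hsub.eq_of_length he))
      have hcard : (PySem.Set.ofList xs).length = xs.dedup.length := by
        have h1 : (PySem.Set.ofList xs).toFinset = xs.toFinset := by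
          ext a; simp [PySem.Set.mem_ofList]
        calc (PySem.Set.ofList xs).length
            = (PySem.Set.ofList xs).toFinset.card :=
              (List.toFinset_card_of_nodup (PySem.Set.nodup_ofList xs)).symm
          _ = xs.toFinset.card := by rw [h1]
          _ = xs.dedup.length := xs.card_toFinset
      omega
    simp [h]
    omega

-- A and B agree on every board
lemma ports_agree (board : List (List Int)) :
    contains_invalid_row_py board = contains_invalid_row_py_alt board := by
  induction board with
  | nil => rfl
  | cons row rest ih =>
    have hA : pvARow row PySem.Set.empty = pvBRow row := by
      rw [pvBRow_eq, pvARow_eq row PySem.Set.empty (by simp [PySem.Set.empty]) (by simp [PySem.Set.empty])]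
      simp [PySem.Set.empty]
    simp only [contains_invalid_row_py, contains_invalid_row_py_alt, hA]
    split <;> [rfl; exact ih]

-- ===== VERDICT (by name: the statement is the Claim_ definition above) =====
theorem contains_invalid_row_py_spec : Claim_equal_contains_invalid_row_py := by
  intro board _
  exact ports_agree board
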